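-- pv_equiv track=rewrite | github.com/nmm131/general-engineer | big_o.py | count_pairs_which_sum_to_max
-- ===== SOURCE A (Python) =====
-- def count_pairs_which_sum_to_max(array):
--     max_value = max(array) # O(a)
--     count = 0
--
--     for left in range(0, len(array)): # O(a)
--         for right in range(left + 1, len(array)): # O(a)
--             left_value = array[left]
--             right_value = array[right]
--             if left_value * right_value == max_value:
--                 count += 1
--     return count
-- ===== SOURCE B (Python) =====
-- def count_pairs_which_sum_to_max(array):
--     m = max(array)
--     seen = {}
--     count = 0
--     for c in array:
--         if c == 0:
--             if m == 0:
--                 count += sum(seen.values())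
--         elif m % c == 0:
--             count += seen.get(m // c, 0)
--         seen[c] = seen.get(c, 0) + 1
--     return count
-- ===== Notes on version B (the rewrite author's own statement) =====
-- stated objective: faster
-- what changed: Replaced the quadratic double index loop with a single pass keeping a counter of previously seen values and looking up max//c for each element (handling c==0 via the running total), removing the inner scan.
import Mathlib
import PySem

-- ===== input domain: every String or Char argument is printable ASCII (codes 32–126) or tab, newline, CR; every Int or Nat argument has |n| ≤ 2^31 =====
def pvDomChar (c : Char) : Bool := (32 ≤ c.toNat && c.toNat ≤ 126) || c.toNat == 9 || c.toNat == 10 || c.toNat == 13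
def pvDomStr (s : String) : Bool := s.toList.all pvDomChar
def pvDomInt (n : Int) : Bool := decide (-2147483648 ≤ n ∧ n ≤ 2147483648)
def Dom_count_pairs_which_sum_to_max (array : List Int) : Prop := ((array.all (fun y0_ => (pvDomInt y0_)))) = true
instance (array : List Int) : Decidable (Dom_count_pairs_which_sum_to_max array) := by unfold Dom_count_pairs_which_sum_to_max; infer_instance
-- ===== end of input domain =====

-- B replaces A's O(n^2) double index loop by a single pass with a counter of previously
-- seen values, looking up max//c for each element (asymptotically faster; measured by the check).


-- ===== PORT A =====
def count_pairs_which_sum_to_max (array : List Int) : Int :=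
  match PySem.List.max? array (fun x => x) with
  | none => 0  -- max([]) raises ValueError; excluded by Pre_
  | some max_value =>
    (PySem.List.pyRange 0 (array.length : Int) 1).foldl (fun count left =>
      (PySem.List.pyRange (left + 1) (array.length : Int) 1).foldl (fun count right =>
        -- both indices are always in range, so pyGetD's default is never used
        if PySem.List.pyGetD array left 0 * PySem.List.pyGetD array right 0 = max_value
        then count + 1 else count) count) 0

-- ===== PORT B =====
def count_pairs_which_sum_to_max_alt (array : List Int) : Int :=
  match PySem.List.max? array (fun x => x) with
  | none => 0  -- max([]) raises ValueError; excluded by Pre_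
  | some m =>
    (array.foldl (fun (st : Int × PySem.Dict Int Int) c =>
        let count :=
          if c = 0 then (if m = 0 then st.1 + (PySem.Dict.values st.2).sum else st.1)
          else if PySem.Int.mod m c = 0 then st.1 + PySem.Dict.getD st.2 (PySem.Int.floordiv m c) 0
          else st.1
        (count, PySem.Dict.insert st.2 c (PySem.Dict.getD st.2 c 0 + 1)))
      (0, PySem.Dict.empty)).1

-- ===== PRECONDITION & SPEC =====
-- max(array) raises ValueError on the empty list (in both A and B), so Pre_ excludes it.
def Pre_count_pairs_which_sum_to_max (array : List Int) : Prop := array ≠ []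
instance (array : List Int) : Decidable (Pre_count_pairs_which_sum_to_max array) := by unfold Pre_count_pairs_which_sum_to_max; infer_instance
def pvWitness_count_pairs_which_sum_to_max : List Int := [2, 3, 6, 1]
def Spec_count_pairs_which_sum_to_max (array : List Int) (out : Int) : Prop := out = count_pairs_which_sum_to_max_alt array
instance (array : List Int) (out : Int) : Decidable (Spec_count_pairs_which_sum_to_max array out) := by unfold Spec_count_pairs_which_sum_to_max; infer_instance

-- ===== CLAIM (what is proved, stated in full; the proofs are below) =====
def Claim_equal_count_pairs_which_sum_to_max : Prop := ∀ (array : List Int), Dom_count_pairs_which_sum_to_max array → Pre_count_pairs_which_sum_to_max array → Spec_count_pairs_which_sum_to_max array (count_pairs_which_sum_to_max array)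

-- ===== LEMMAS AND PROOFS =====

-- Reference value: for each element, the number of matching partners AFTER it.
def pairCount (m : Int) : List Int → Int
  | [] => 0
  | x :: xs => ((xs.countP (fun y => x * y = m) : Nat) : Int) + pairCount m xs

-- cross count: matches of each element of l against a fixed prefix p
def crossX (m : Int) (p l : List Int) : Int :=
  (l.map (fun y => ((p.countP (fun s => s * y = m) : Nat) : Int))).sum

lemma crossX_nil_left (m : Int) (l : List Int) : crossX m [] l = 0 := by
  unfold crossX
  rw [List.map_congr_left (fun y _ => by simp : ∀ y ∈ l, ((([] : List Int).countP (fun s => s * y = m) : Nat) : Int) = 0)]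
  simp

lemma crossX_append_singleton (m x : Int) (l p : List Int) :
    crossX m (p ++ [x]) l = crossX m p l + ((l.countP (fun y => x * y = m) : Nat) : Int) := by
  unfold crossX
  have h1 : ∀ y ∈ l, (((p ++ [x]).countP (fun s => s * y = m) : Nat) : Int)
      = ((p.countP (fun s => s * y = m) : Nat) : Int)
        + (if (fun y => decide (x * y = m)) y = true then (1 : Int) else 0) := by
    intro y _
    rcases eq_or_ne (x * y) m with h | h <;> simp [List.countP_append, h]
  rw [List.map_congr_left h1, PySem.List.sum_map_add_int, PySem.List.sum_map_ite_one_zero]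

-- sum of the counter's values is the length of the counted list
lemma sum_values_counter (p : List Int) :
    ((PySem.Dict.counter p).values).sum = (p.length : Int) := by
  have hitems := PySem.Dict.items_counter p
  have hvals : (PySem.Dict.counter p).values
      = (PySem.Set.ofList p).map (fun k => ((p.count k : Nat) : Int)) := by
    simp [PySem.Dict.values, hitems, List.map_map]
  rw [hvals]
  have hperm : (PySem.Set.ofList p).Perm p.dedup := by
    apply List.perm_of_nodup_nodup_toFinset_eq (PySem.Set.nodup_ofList p) p.nodup_dedup
    ext a
    simp [PySem.Set.mem_ofList]
  calc ((PySem.Set.ofList p).map (fun k => ((p.count k : Nat) : Int))).sum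
      = (p.dedup.map (fun k => ((p.count k : Nat) : Int))).sum :=
        (hperm.map _).sum_eq
    _ = ((p.dedup.map (fun k => (p.count k : Nat))).map (Nat.cast : Nat → Int)).sum := by
        rw [List.map_map]; rfl
    _ = ((p.dedup.map (fun k => (p.count k : Nat))).sum : Int) :=
        (Nat.cast_list_sum _).symm
    _ = (p.length : Int) := by rw [List.sum_map_count_dedup_eq_length]

-- B's per-element increment equals the number of matches in the seen prefix
lemma match_eq (m c : Int) (p : List Int) :
    (if c = 0 then (if m = 0 then (p.length : Int) else 0)
     else if PySem.Int.mod m c = 0 then ((p.count (PySem.Int.floordiv m c) : Nat) : Int)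
     else 0)
    = ((p.countP (fun s => s * c = m) : Nat) : Int) := by
  by_cases hc : c = 0
  · subst hc
    by_cases hm : m = 0
    · subst hm
      have hcp : (p.countP (fun s => s * 0 = 0) : Nat) = p.length :=
        List.countP_eq_length.mpr (fun s _ => by simp)
      rw [if_pos (rfl : (0:Int) = 0), if_pos (rfl : (0:Int) = 0), hcp]
    · have hcp : (p.countP (fun s => s * 0 = m) : Nat) = 0 :=
        List.countP_eq_zero.mpr (fun s _ h => hm ((of_decide_eq_true h).symm.trans (mul_zero s)))
      rw [if_pos (rfl : (0:Int) = 0), if_neg hm, hcp]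
      simp
  · simp only [if_neg hc]
    by_cases hd : PySem.Int.mod m c = 0
    · simp only [if_pos hd]
      have hdvd := (PySem.Int.mod_eq_zero_iff_dvd m c).mp hd
      have hq : PySem.Int.floordiv m c * c = m := by
        have := PySem.Int.floordiv_mul_add_mod m c; omega
      congr 1
      rw [List.count_eq_countP]
      apply List.countP_congr
      intro s _
      simp only [beq_iff_eq, decide_eq_true_eq]
      constructor
      · intro h; subst h; exact hq
      · intro h; exact mul_right_cancel₀ hc (h.trans hq.symm)
    · simp only [if_neg hd]
      rw [show (p.countP (fun s => s * c = m) : Nat) = 0 from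
        List.countP_eq_zero.mpr (fun s _ h => hd ((PySem.Int.mod_eq_zero_iff_dvd m c).mpr
          ⟨s, (of_decide_eq_true h).symm.trans (mul_comm s c)⟩))]
      simp

-- === B side ===
lemma B_fold (m : Int) (l : List Int) : ∀ (p : List Int) (cnt : Int),
    (l.foldl (fun (st : Int × PySem.Dict Int Int) c =>
        let count :=
          if c = 0 then (if m = 0 then st.1 + (PySem.Dict.values st.2).sum else st.1)
          else if PySem.Int.mod m c = 0 then st.1 + PySem.Dict.getD st.2 (PySem.Int.floordiv m c) 0
          else st.1
        (count, PySem.Dict.insert st.2 c (PySem.Dict.getD st.2 c 0 + 1)))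
      (cnt, PySem.Dict.counter p)).1
    = cnt + crossX m p l + pairCount m l := by
  induction l with
  | nil => intro p cnt; simp [crossX, pairCount]
  | cons x l ih =>
    intro p cnt
    have hdict : PySem.Dict.insert (PySem.Dict.counter p) x ((PySem.Dict.counter p).getD x 0 + 1)
        = PySem.Dict.counter (p ++ [x]) := by
      rw [PySem.Dict.counter_append_singleton]; rfl
    have hcnt :
        (if x = 0 then (if m = 0 then cnt + (PySem.Dict.values (PySem.Dict.counter p)).sum else cnt)
         else if PySem.Int.mod m x = 0 then cnt + (PySem.Dict.counter p).getD (PySem.Int.floordiv m x) 0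
         else cnt)
        = cnt + ((p.countP (fun s => s * x = m) : Nat) : Int) := by
      rw [← match_eq m x p]
      by_cases hx : x = 0
      · by_cases hm : m = 0 <;> simp [hx, hm, sum_values_counter]
      · by_cases hd : PySem.Int.mod m x = 0 <;> simp [hx, hd, PySem.Dict.getD_counter]
    rw [List.foldl_cons]
    simp only []
    rw [hdict, hcnt, ih (p ++ [x]), crossX_append_singleton]
    simp [crossX, pairCount]
    ring

-- === A side ===
lemma A_fold (m : Int) (array : List Int) : ∀ (n a : Nat) (cnt : Int), array.length - a = n →
    (PySem.List.pyRange (a : Int) (array.length : Int) 1).foldl (fun count left =>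
      (PySem.List.pyRange (left + 1) (array.length : Int) 1).foldl (fun count right =>
        if PySem.List.pyGetD array left 0 * PySem.List.pyGetD array right 0 = m
        then count + 1 else count) count) cnt
    = cnt + pairCount m (array.drop a) := by
  intro n
  induction n with
  | zero =>
    intro a cnt h
    have ha : array.length ≤ a := by omega
    rw [PySem.List.pyRange_one_eq_nil (by exact_mod_cast ha)]
    simp [List.drop_eq_nil_of_le ha, pairCount]
  | succ n ih =>
    intro a cnt h
    have ha : a < array.length := by omega
    rw [PySem.List.pyRange_one_cons (by exact_mod_cast ha)]
    rw [List.foldl_cons]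
    -- inner loop at left = a
    have hinner :
        (PySem.List.pyRange ((a : Int) + 1) (array.length : Int) 1).foldl (fun count right =>
          if PySem.List.pyGetD array (a : Int) 0 * PySem.List.pyGetD array right 0 = m
          then count + 1 else count) cnt
        = cnt + ((array.drop (a+1)).countP (fun y => array[a] * y = m) : Nat) := by
      have hget : PySem.List.pyGetD array (a : Int) 0 = array[a] := by
        rw [PySem.List.pyGetD_eq_getElem array 0 (Int.natCast_nonneg a) (by exact_mod_cast ha)]
        simp
      have hcast : ((a : Int) + 1) = ((a + 1 : Nat) : Int) := by push_cast; ring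
      rw [hcast,
        PySem.List.foldl_pyRange_pyGetD' array 0
          (fun count v => if PySem.List.pyGetD array (a : Int) 0 * v = m then count + 1 else count)
          cnt (Int.natCast_nonneg (a + 1))]
      rw [hget]
      simp only [Int.toNat_natCast]
      simpa using PySem.List.foldl_count_if (fun y => decide (array[a] * y = m))
        (List.drop (a + 1) array) cnt
    rw [hinner]
    have hcast : ((a : Int) + 1) = ((a + 1 : Nat) : Int) := by push_cast; ring
    rw [hcast, ih (a+1) _ (by omega)]
    have hdrop : array.drop a = array[a] :: array.drop (a + 1) :=
      List.drop_eq_getElem_cons ha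
    rw [hdrop]
    simp [pairCount]
    ring

-- ===== VERDICT (by name: the statement is the Claim_ definition above) =====
theorem count_pairs_which_sum_to_max_spec : Claim_equal_count_pairs_which_sum_to_max := by
  intro array _ hpre
  unfold Spec_count_pairs_which_sum_to_max
  unfold count_pairs_which_sum_to_max count_pairs_which_sum_to_max_alt
  cases hmx : PySem.List.max? array (fun x => x) with
  | none => rfl
  | some m =>
    simp only []
    have hA := A_fold m array array.length 0 0 (by omega)
    simp only [Nat.cast_zero, List.drop_zero, zero_add] at hA
    rw [hA]
    have hB := B_fold m array [] 0
    rw [show PySem.Dict.counter ([] : List Int) = PySem.Dict.empty from rfl, crossX_nil_left] at hB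
    rw [hB]
    ring
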